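-- pv_equiv track=rewrite | github.com/rmbryan71/euler | p104.py | is_tail_pan
-- ===== SOURCE A (Python) =====
-- def is_tail_pan(n):
--     y = []
--     x = str(n % 1000000000)
--     for char in str(x):
--         y.append(char)
--     y.sort()
--     if y == ['1', '2', '3', '4', '5', '6', '7', '8', '9']:
--         return True
--     else:
--         return False
-- ===== SOURCE B (Python) =====
-- def is_tail_pan(n):
--     m = n % 1000000000
--     seen = set()
--     for _ in range(9):
--         d = m % 10
--         if d == 0 or d in seen:
--             return False
--         seen.add(d)
--         m //= 10
--     return True
-- ===== Notes on version B (the rewrite author's own statement) =====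
-- stated objective: alternative
-- what changed: Replaces string conversion, a char-append loop and a sort with a fixed nine-step arithmetic digit extraction maintaining a seen-set that fails early on a zero or repeated digit.
import Mathlib
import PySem

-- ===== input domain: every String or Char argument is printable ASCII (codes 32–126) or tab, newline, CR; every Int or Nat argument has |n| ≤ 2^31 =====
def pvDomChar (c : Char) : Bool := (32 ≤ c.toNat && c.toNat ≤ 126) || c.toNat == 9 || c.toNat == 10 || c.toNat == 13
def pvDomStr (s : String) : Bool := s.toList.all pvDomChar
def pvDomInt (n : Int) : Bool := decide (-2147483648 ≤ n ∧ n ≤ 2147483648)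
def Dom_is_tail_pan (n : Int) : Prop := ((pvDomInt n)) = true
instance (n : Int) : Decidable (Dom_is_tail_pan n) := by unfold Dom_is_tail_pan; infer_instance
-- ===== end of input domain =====

-- B replaces A's string conversion + sort by a fixed nine-step arithmetic digit extraction with a seen-set and early exit (same return value everywhere).

-- ===== PORT A =====
def is_tail_pan (n : Int) : Bool :=
  let y : List Char := []
  let x : String := PySem.Int.toStr (PySem.Int.mod n 1000000000)
  let y := x.toList.foldl (fun acc c => acc ++ [c]) y
  let y := PySem.List.sorted y (fun c => c) false
  if y = ['1', '2', '3', '4', '5', '6', '7', '8', '9'] then true else false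

-- ===== PORT B =====
-- the 'for _ in range(9)' loop of Source B, with its early returns, as fuel recursion
def pvAltLoop : Nat → Int → PySem.Set Int → Bool
  | 0, _, _ => true
  | k+1, m, seen =>
    let d := PySem.Int.mod m 10
    if d == 0 || PySem.Set.contains seen d then false
    else pvAltLoop k (PySem.Int.floordiv m 10) (PySem.Set.add seen d)

def is_tail_pan_alt (n : Int) : Bool :=
  pvAltLoop 9 (PySem.Int.mod n 1000000000) PySem.Set.empty

-- ===== PRECONDITION & SPEC =====
def Spec_is_tail_pan (n : Int) (out : Bool) : Prop := out = is_tail_pan_alt n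
instance (n : Int) (out : Bool) : Decidable (Spec_is_tail_pan n out) := by unfold Spec_is_tail_pan; infer_instance

-- ===== CLAIM (what is proved, stated in full; the proofs are below) =====
def Claim_equal_is_tail_pan : Prop := ∀ (n : Int), Dom_is_tail_pan n → Spec_is_tail_pan n (is_tail_pan n)

-- ===== LEMMAS AND PROOFS =====

-- the nine low decimal digits of M, least significant first (proof-only helper)
def pvPadN : Nat → Nat → List Nat
  | 0, _ => []
  | k+1, M => M % 10 :: pvPadN k (M / 10)

theorem pv_foldl_push (l acc : List Char) :
    l.foldl (fun a c => a ++ [c]) acc = acc ++ l := by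
  induction l generalizing acc with
  | nil => simp
  | cons c t ih => simp [List.foldl, ih]

theorem pv_tdc (fuel : Nat) : ∀ (n : Nat) (ds : List Char), n < fuel →
    Nat.toDigitsCore 10 fuel n ds =
      (if n = 0 then '0' :: ds else ((Nat.digits 10 n).map Nat.digitChar).reverse ++ ds) := by
  induction fuel with
  | zero => intro n ds h; omega
  | succ fuel ih =>
    intro n ds _
    by_cases hn : n = 0
    · subst hn; simp [Nat.toDigitsCore, Nat.digitChar]
    · have hpos : 0 < n := Nat.pos_of_ne_zero hn
      have hdig : Nat.digits 10 n = n % 10 :: Nat.digits 10 (n / 10) :=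
        Nat.digits_def' (by norm_num) hpos
      by_cases hq : n / 10 = 0
      · simp [Nat.toDigitsCore, hq, hn, hdig]
      · have hlt : n / 10 < fuel := by
          have := Nat.div_lt_self hpos (by norm_num : 1 < 10)
          omega
        simp [Nat.toDigitsCore, hq, hn, hdig, ih (n / 10) (Nat.digitChar (n % 10) :: ds) hlt]

theorem pv_toChars (M : Nat) :
    PySem.Int.toChars (M : Int) =
      (if M = 0 then ['0'] else ((Nat.digits 10 M).map Nat.digitChar).reverse) := by
  have h1 : ¬ ((M : Int) < 0) := by exact_mod_cast Int.not_lt.mpr (Int.natCast_nonneg M)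
  have h2 : ((M : Int)).toNat = M := Int.toNat_natCast M
  simp only [PySem.Int.toChars, h1, if_false, h2, Nat.toDigits,
    pv_tdc (M + 1) M [] (Nat.lt_succ_self M)]
  split <;> simp

theorem pv_padN_zero (k : Nat) : pvPadN k 0 = List.replicate k 0 := by
  induction k with
  | zero => rfl
  | succ k ih => simp [pvPadN, ih, List.replicate]

theorem pv_padN_eq (k : Nat) : ∀ M : Nat, M < 10 ^ k →
    pvPadN k M = Nat.digits 10 M ++ List.replicate (k - (Nat.digits 10 M).length) 0 := by
  induction k with
  | zero =>
    intro M h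
    interval_cases M
    rfl
  | succ k ih =>
    intro M h
    by_cases hM : M = 0
    · subst hM; simp [pv_padN_zero]
    · have hdig : Nat.digits 10 M = M % 10 :: Nat.digits 10 (M / 10) :=
        Nat.digits_def' (by norm_num) (Nat.pos_of_ne_zero hM)
      have hq : M / 10 < 10 ^ k := by
        rw [Nat.div_lt_iff_lt_mul (by norm_num)]
        calc M < 10 ^ (k + 1) := h
        _ = 10 ^ k * 10 := by ring
      simp [pvPadN, hdig, ih (M / 10) hq, Nat.succ_sub_succ]

theorem pv_digitChar_inj : ∀ a < 10, ∀ b < 10, Nat.digitChar a = Nat.digitChar b → a = b := by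
  decide

theorem pv_digitChar_mem : ∀ d < 10,
    (Nat.digitChar d ∈ ['1', '2', '3', '4', '5', '6', '7', '8', '9'] ↔ d ≠ 0) := by
  decide

theorem pv_altLoop_iff (k : Nat) : ∀ (M : Nat) (seen : PySem.Set Int),
    pvAltLoop k (M : Int) seen = true ↔
      ((pvPadN k M).Nodup ∧ ∀ d ∈ pvPadN k M, d ≠ 0 ∧ ((d : Int) ∉ seen)) := by
  induction k with
  | zero => intro M seen; simp [pvAltLoop, pvPadN]
  | succ k ih =>
    intro M seen
    have hmod : PySem.Int.mod (M : Int) 10 = ((M % 10 : Nat) : Int) := by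
      exact_mod_cast PySem.Int.mod_natCast M 10
    have hdiv : PySem.Int.floordiv (M : Int) 10 = ((M / 10 : Nat) : Int) := by
      exact_mod_cast PySem.Int.floordiv_natCast M 10
    by_cases h0 : M % 10 = 0
    · have hcond : ((((M % 10 : Nat)) : Int) == 0) = true := by
        simp only [beq_iff_eq, Nat.cast_eq_zero]; exact h0
      simp only [pvAltLoop, hmod, hcond, Bool.true_or, if_true]
      constructor
      · intro h; exact absurd h (by simp)
      · rintro ⟨-, hall⟩
        exact ((hall (M % 10) (by simp [pvPadN])).1 h0).elim
    · by_cases hs : ((M % 10 : Nat) : Int) ∈ seen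
      · have hc : PySem.Set.contains seen ((M % 10 : Nat) : Int) = true :=
          (PySem.Set.contains_iff _ _).mpr hs
        simp only [pvAltLoop, hmod, hc, Bool.or_true, if_true]
        constructor
        · intro h; exact absurd h (by simp)
        · rintro ⟨-, hall⟩
          exact absurd hs (hall (M % 10) (by simp [pvPadN])).2
      · have hc : PySem.Set.contains seen ((M % 10 : Nat) : Int) = false := by
          rw [Bool.eq_false_iff]
          intro hh
          exact hs ((PySem.Set.contains_iff _ _).mp hh)
        have h0' : (((M % 10 : Nat) : Int) == 0) = false := by
          simp only [beq_eq_false_iff_ne, ne_eq, Nat.cast_eq_zero]; exact h0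
        simp only [pvAltLoop, hmod, hdiv, hc, h0', Bool.or_false, Bool.false_eq_true, if_false]
        rw [ih (M / 10) (PySem.Set.add seen ((M % 10 : Nat) : Int))]
        simp only [pvPadN, List.nodup_cons, List.mem_cons, forall_eq_or_imp,
          PySem.Set.mem_add, Nat.cast_inj]
        constructor
        · rintro ⟨hnd, hall⟩
          refine ⟨⟨?_, hnd⟩, ⟨h0, hs⟩, fun d hd => ⟨(hall d hd).1, fun hmem => (hall d hd).2 (Or.inl hmem)⟩⟩
          intro hmem
          exact (hall _ hmem).2 (Or.inr rfl)
        · rintro ⟨⟨hne, hnd⟩, ⟨-, -⟩, hall⟩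
          refine ⟨hnd, fun d hd => ⟨(hall d hd).1, ?_⟩⟩
          rintro (hmem | hmem)
          · exact (hall d hd).2 hmem
          · exact hne (hmem ▸ hd)

theorem pv_main_iff (M : Nat) (h : M < 10 ^ 9) :
    (PySem.Int.toChars (M : Int)).Perm ['1', '2', '3', '4', '5', '6', '7', '8', '9'] ↔
      ((pvPadN 9 M).Nodup ∧ ∀ d ∈ pvPadN 9 M, d ≠ 0) := by
  rw [pv_toChars]
  by_cases hM : M = 0
  · subst hM
    simp only [pv_padN_zero]
    constructor
    · intro hp; exact absurd hp (by decide)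
    · rintro ⟨-, hnz⟩
      exact ((hnz 0 (by simp)) rfl).elim
  · simp only [hM, if_false]
    have hrev : (((Nat.digits 10 M).map Nat.digitChar).reverse.Perm
        ['1', '2', '3', '4', '5', '6', '7', '8', '9']) ↔
        (((Nat.digits 10 M).map Nat.digitChar).Perm
        ['1', '2', '3', '4', '5', '6', '7', '8', '9']) :=
      ⟨fun hp => (List.reverse_perm _).symm.trans hp, fun hp => (List.reverse_perm _).trans hp⟩
    rw [hrev, pv_padN_eq 9 M h]
    have hlen9 : (Nat.digits 10 M).length ≤ 9 := (Nat.digits_length_le_iff (by norm_num) M).mpr h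
    constructor
    · intro hperm
      have hlen : (Nat.digits 10 M).length = 9 := by
        have := hperm.length_eq
        simp only [List.length_map] at this
        simpa using this
      have hrep : 9 - (Nat.digits 10 M).length = 0 := by omega
      rw [hrep]
      simp only [List.replicate_zero, List.append_nil]
      constructor
      · exact List.Nodup.of_map Nat.digitChar (hperm.nodup_iff.mpr (by decide))
      · intro d hd
        have hd10 : d < 10 := Nat.digits_lt_base (by norm_num) hd
        exact (pv_digitChar_mem d hd10).mp (hperm.subset (List.mem_map_of_mem hd))
    · rintro ⟨hnd, hnz⟩
      have hlen : (Nat.digits 10 M).length = 9 := by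
        by_contra hne
        have hmem : (0 : Nat) ∈ Nat.digits 10 M ++ List.replicate (9 - (Nat.digits 10 M).length) 0 := by
          apply List.mem_append_right
          rw [List.mem_replicate]
          exact ⟨by omega, rfl⟩
        exact (hnz 0 hmem) rfl
      rw [hlen] at hnd hnz
      simp only [Nat.sub_self, List.replicate_zero, List.append_nil] at hnd hnz
      have hmap_nd : ((Nat.digits 10 M).map Nat.digitChar).Nodup := by
        refine List.Nodup.map_on ?_ hnd
        intro x hx y hy hxy
        exact pv_digitChar_inj x (Nat.digits_lt_base (by norm_num) hx) y
          (Nat.digits_lt_base (by norm_num) hy) hxy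
      have hsub : (Nat.digits 10 M).map Nat.digitChar ⊆ ['1', '2', '3', '4', '5', '6', '7', '8', '9'] := by
        intro c hc
        obtain ⟨d, hd, rfl⟩ := List.mem_map.mp hc
        exact (pv_digitChar_mem d (Nat.digits_lt_base (by norm_num) hd)).mpr (hnz d hd)
      exact (List.subperm_of_subset hmap_nd hsub).perm_of_length_le (by simp [hlen])

-- ===== VERDICT (by name: the statement is the Claim_ definition above) =====
theorem is_tail_pan_spec : Claim_equal_is_tail_pan := by
  intro n _
  show is_tail_pan n = is_tail_pan_alt n
  have hm0 : 0 ≤ PySem.Int.mod n 1000000000 := PySem.Int.mod_nonneg n (by norm_num)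
  obtain ⟨M, hM⟩ : ∃ M : Nat, PySem.Int.mod n 1000000000 = (M : Int) :=
    ⟨_, (Int.toNat_of_nonneg hm0).symm⟩
  have hMlt : M < 10 ^ 9 := by
    have hlt := PySem.Int.mod_lt n (show (0 : Int) < 1000000000 by norm_num)
    rw [hM] at hlt
    exact_mod_cast hlt
  rw [Bool.eq_iff_iff]
  unfold is_tail_pan is_tail_pan_alt
  simp only [hM, PySem.Int.toList_toStr, pv_foldl_push, List.nil_append]
  rw [pv_altLoop_iff]
  have hT : PySem.List.sorted ['1', '2', '3', '4', '5', '6', '7', '8', '9'] (fun c => c) false =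
      ['1', '2', '3', '4', '5', '6', '7', '8', '9'] := by decide
  have hempty : ∀ d : Nat, ((d : Int) ∉ (PySem.Set.empty : PySem.Set Int)) := by
    intro d
    simp [PySem.Set.empty]
  constructor
  · intro hif
    have hsorted : PySem.List.sorted (PySem.Int.toChars (M : Int)) (fun c => c) false =
        ['1', '2', '3', '4', '5', '6', '7', '8', '9'] := by
      by_contra hne
      rw [if_neg hne] at hif
      exact absurd hif (by simp)
    rw [← hT, PySem.List.sorted_id_eq_sorted_id_iff_perm] at hsorted
    obtain ⟨h1, h2⟩ := (pv_main_iff M hMlt).mp hsorted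
    exact ⟨h1, fun d hd => ⟨h2 d hd, hempty d⟩⟩
  · rintro ⟨h1, h2⟩
    have hperm := (pv_main_iff M hMlt).mpr ⟨h1, fun d hd => (h2 d hd).1⟩
    rw [← PySem.List.sorted_id_eq_sorted_id_iff_perm, hT] at hperm
    rw [if_pos hperm]
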